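-- pv_equiv track=rewrite | github.com/jazzband/django-admin2 | setup.py | remove_screenshots
-- ===== SOURCE A (Python) =====
-- import string
--
-- def remove_screenshots(text):
--     """
--     Removes the section with screenshots since PyPI doesn't like them.
--     """
--     outputting = True
--     new_text = ""
--     for line in text.splitlines():
--         if line.startswith("Screenshots"):
--             outputting = False
--             continue
--         if len(line) and line[0] in string.ascii_letters:
--             outputting = True
--         if outputting:
--             new_text += line + '\n'
--     return new_text
-- ===== SOURCE B (Python) =====
-- import string
--
--
-- def _is_header(line):
--     # a line opens a new section iff it is non-empty and starts with an ASCII letter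
--     return bool(line) and line[0] in string.ascii_letters
--
--
-- def remove_screenshots(text):
--     """
--     Removes the section with screenshots since PyPI doesn't like them.
--
--     Grouping decomposition: partition the lines into a preamble and
--     header-led sections, drop the sections headed by 'Screenshots',
--     then join everything kept.
--     """
--     preamble = []
--     sections = []
--     for line in text.splitlines():
--         if _is_header(line):
--             sections.append([line])
--         elif sections:
--             sections[-1].append(line)
--         else:
--             preamble.append(line)
--     kept = preamble + [l for sec in sections
--                        if not sec[0].startswith("Screenshots")
--                        for l in sec]
--     return ''.join(l + '\n' for l in kept)
-- ===== Notes on version B (the rewrite author's own statement) =====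
-- stated objective: alternative
-- what changed: Replaces the single-pass boolean output flag with an explicit grouped representation: lines are partitioned into a preamble plus header-led sections, the screenshot-headed sections are filtered out, and the kept lines are joined in one pass.
import Mathlib
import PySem

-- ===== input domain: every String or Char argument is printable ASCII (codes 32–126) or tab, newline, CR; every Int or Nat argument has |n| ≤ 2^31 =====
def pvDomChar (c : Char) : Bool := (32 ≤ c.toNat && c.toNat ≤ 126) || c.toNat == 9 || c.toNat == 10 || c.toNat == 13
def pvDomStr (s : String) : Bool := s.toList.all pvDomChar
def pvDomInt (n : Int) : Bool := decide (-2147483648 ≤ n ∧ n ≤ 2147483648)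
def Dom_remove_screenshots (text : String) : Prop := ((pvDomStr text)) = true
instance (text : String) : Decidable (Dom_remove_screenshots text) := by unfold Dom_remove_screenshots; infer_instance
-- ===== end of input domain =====

-- B replaces A's single-pass 'outputting' flag with grouping into preamble + header-led
-- sections followed by a filtering pass (objective: alternative decomposition, same cost).

-- ===== PORT A =====
-- exact membership test `c in string.ascii_letters` (two contiguous ASCII ranges)
def pvAsciiLetter (c : Char) : Bool :=
  (65 ≤ c.toNat && c.toNat ≤ 90) || (97 ≤ c.toNat && c.toNat ≤ 122)

-- exact for `len(line) and line[0] in string.ascii_letters`: line[0] exists iff the line is nonempty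
def pvIsHeader (line : String) : Bool :=
  match line.toList with
  | [] => false
  | c :: _ => pvAsciiLetter c

-- the body of A's loop; strings are accumulated as List Char (Lean's String.append is kernel-opaque)
def pvStepA (st : Bool × List Char) (line : String) : Bool × List Char :=
  if PySem.Str.startswith line "Screenshots" then (false, st.2)
  else
    let outputting := if pvIsHeader line then true else st.1
    if outputting then (outputting, st.2 ++ line.toList ++ ['\n']) else (outputting, st.2)

def remove_screenshots (text : String) : String :=
  String.ofList ((PySem.Str.splitlines text).foldl pvStepA (true, [])).2

-- ===== PORT B =====
-- `not sec[0].startswith("Screenshots")`; sections are always nonempty, so headD "" is exact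
def pvKeepSec (sec : List String) : Bool := !(PySem.Str.startswith (sec.headD "") "Screenshots")

-- `sections[-1].append(line)`
def pvAppendLast (secs : List (List String)) (line : String) : List (List String) :=
  match secs with
  | [] => []
  | [s] => [s ++ [line]]
  | s :: rest => s :: pvAppendLast rest line

-- the body of B's grouping loop over (preamble, sections)
def pvStepB (st : List String × List (List String)) (line : String) :
    List String × List (List String) :=
  if pvIsHeader line then (st.1, st.2 ++ [[line]])
  else if st.2.isEmpty then (st.1 ++ [line], st.2)
  else (st.1, pvAppendLast st.2 line)

def remove_screenshots_alt (text : String) : String :=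
  let st := (PySem.Str.splitlines text).foldl pvStepB ([], [])
  let kept := st.1 ++ (st.2.filter pvKeepSec).flatten
  String.ofList (kept.flatMap (fun l => l.toList ++ ['\n']))

-- ===== PRECONDITION & SPEC =====
def Spec_remove_screenshots (text : String) (out : String) : Prop := out = remove_screenshots_alt text
instance (text : String) (out : String) : Decidable (Spec_remove_screenshots text out) := by unfold Spec_remove_screenshots; infer_instance

-- ===== CLAIM (what is proved, stated in full; the proofs are below) =====
def Claim_equal_remove_screenshots : Prop := ∀ (text : String), Dom_remove_screenshots text → Spec_remove_screenshots text (remove_screenshots text)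

-- ===== LEMMAS AND PROOFS =====

-- A's 'outputting' flag, read off B's section list: false iff the current (last) section is dropped
def pvNoDrop (secs : List (List String)) : Bool :=
  match secs.getLast? with
  | none => true
  | some s => pvKeepSec s

-- the joined output of a list of kept lines
def pvRender (ls : List String) : List Char := ls.flatMap (fun l => l.toList ++ ['\n'])

lemma pvKeepSec_append (s : List String) (hs : s ≠ []) (line : String) :
    pvKeepSec (s ++ [line]) = pvKeepSec s := by
  cases s with
  | nil => exact absurd rfl hs
  | cons a t => simp [pvKeepSec]

lemma pvNoDrop_concat (secs : List (List String)) (s : List String) :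
    pvNoDrop (secs ++ [s]) = pvKeepSec s := by
  simp [pvNoDrop]

lemma pvNoDrop_cons_of_ne (s : List String) (X : List (List String)) (h : X ≠ []) :
    pvNoDrop (s :: X) = pvNoDrop X := by
  cases X with
  | nil => exact absurd rfl h
  | cons t ts => simp [pvNoDrop, List.getLast?_cons_cons]

lemma pvAppendLast_cons_cons (s t : List String) (ts : List (List String)) (line : String) :
    pvAppendLast (s :: t :: ts) line = s :: pvAppendLast (t :: ts) line := rfl

lemma pvAppendLast_ne_nil (secs : List (List String)) (line : String) (h : secs ≠ []) :
    pvAppendLast secs line ≠ [] := by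
  cases secs with
  | nil => exact absurd rfl h
  | cons s rest => cases rest <;> simp [pvAppendLast]

lemma pvAppendLast_noDrop (secs : List (List String)) (line : String)
    (h : secs ≠ []) (hne : ∀ s ∈ secs, s ≠ []) :
    pvNoDrop (pvAppendLast secs line) = pvNoDrop secs := by
  induction secs with
  | nil => exact absurd rfl h
  | cons s rest ih =>
    cases rest with
    | nil =>
      simp [pvAppendLast, pvNoDrop, pvKeepSec_append s (hne s (by simp)) line]
    | cons t ts =>
      rw [pvAppendLast_cons_cons,
          pvNoDrop_cons_of_ne s _ (pvAppendLast_ne_nil _ line (by simp)),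
          pvNoDrop_cons_of_ne s _ (List.cons_ne_nil t ts)]
      exact ih (by simp) (fun x hx => hne x (List.mem_cons_of_mem _ hx))

lemma pvAppendLast_filter_flatten (secs : List (List String)) (line : String)
    (h : secs ≠ []) (hne : ∀ s ∈ secs, s ≠ []) :
    ((pvAppendLast secs line).filter pvKeepSec).flatten
      = (secs.filter pvKeepSec).flatten ++ (if pvNoDrop secs then [line] else []) := by
  induction secs with
  | nil => exact absurd rfl h
  | cons s rest ih =>
    cases rest with
    | nil =>
      by_cases hk : pvKeepSec s = true <;>
        simp [pvAppendLast, pvNoDrop, pvKeepSec_append s (hne s (by simp)) line, hk]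
    | cons t ts =>
      have hrec := ih (by simp) (fun x hx => hne x (List.mem_cons_of_mem _ hx))
      rw [pvAppendLast_cons_cons, pvNoDrop_cons_of_ne s _ (List.cons_ne_nil t ts)]
      by_cases hk : pvKeepSec s = true <;>
        simp [List.filter_cons, hk, hrec]

lemma pvAppendLast_ne_nil_mem (secs : List (List String)) (line : String)
    (hne : ∀ s ∈ secs, s ≠ []) :
    ∀ s ∈ pvAppendLast secs line, s ≠ [] := by
  induction secs with
  | nil => simp [pvAppendLast]
  | cons s rest ih =>
    cases rest with
    | nil =>
      intro x hx
      have hx' : x = s ++ [line] := by simpa [pvAppendLast] using hx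
      subst hx'
      simp
    | cons t ts =>
      intro x hx
      rw [pvAppendLast_cons_cons] at hx
      rcases List.mem_cons.mp hx with hx | hx
      · subst hx; exact hne x (by simp)
      · exact ih (fun y hy => hne y (List.mem_cons_of_mem _ hy)) x hx

-- a line starting with "Screenshots" starts with the letter 'S', hence is a header line
lemma pvIsHeader_of_screens (line : String)
    (hs : PySem.Str.startswith line "Screenshots" = true) : pvIsHeader line = true := by
  have h : "Screenshots".toList <+: line.toList := by
    simpa [PySem.Chars.startswith_iff] using hs
  rcases h with ⟨t, ht⟩
  have : line.toList = 'S' :: ("creenshots".toList ++ t) := by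
    rw [← ht]; rfl
  simp [pvIsHeader, this]
  decide

-- main invariant: running A's loop from the flag/output determined by B's state
-- equals rendering B's final grouped state
lemma pvMain (lines : List String) :
    ∀ (pre : List String) (secs : List (List String)),
      (∀ s ∈ secs, s ≠ []) →
      (lines.foldl pvStepA (pvNoDrop secs, pvRender (pre ++ (secs.filter pvKeepSec).flatten))).2
        = pvRender ((lines.foldl pvStepB (pre, secs)).1
            ++ ((lines.foldl pvStepB (pre, secs)).2.filter pvKeepSec).flatten) := by
  induction lines with
  | nil => intro pre secs _; simp
  | cons line rest ih =>
    intro pre secs hne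
    simp only [List.foldl_cons]
    by_cases hs : PySem.Str.startswith line "Screenshots" = true
    · -- skipped line: it is a header, B opens a (dropped) section
      have hh := pvIsHeader_of_screens line hs
      have hsC : PySem.Chars.startswith line.toList
          ['S','c','r','e','e','n','s','h','o','t','s'] = true := by simpa using hs
      have hA : pvStepA (pvNoDrop secs, pvRender (pre ++ (secs.filter pvKeepSec).flatten)) line
          = (pvNoDrop (secs ++ [[line]]),
             pvRender (pre ++ ((secs ++ [[line]]).filter pvKeepSec).flatten)) := by
        have hk : pvKeepSec [line] = false := by simp [pvKeepSec, hsC]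
        simp [pvStepA, hsC, pvNoDrop_concat, hk, List.filter_append]
      have hB : pvStepB (pre, secs) line = (pre, secs ++ [[line]]) := by
        simp [pvStepB, hh]
      rw [hA, hB]
      exact ih pre (secs ++ [[line]]) (by intro x hx; rcases List.mem_append.mp hx with hx | hx
                                          · exact hne x hx
                                          · simp at hx; subst hx; simp)
    · have hsC : PySem.Chars.startswith line.toList
          ['S','c','r','e','e','n','s','h','o','t','s'] = false := by simpa using hs
      by_cases hh : pvIsHeader line = true
      · -- header line opening a kept section
        have hk : pvKeepSec [line] = true := by simp [pvKeepSec, hsC]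
        have hA : pvStepA (pvNoDrop secs, pvRender (pre ++ (secs.filter pvKeepSec).flatten)) line
            = (pvNoDrop (secs ++ [[line]]),
               pvRender (pre ++ ((secs ++ [[line]]).filter pvKeepSec).flatten)) := by
          simp [pvStepA, hsC, hh, pvNoDrop_concat, hk, List.filter_append, pvRender]
        have hB : pvStepB (pre, secs) line = (pre, secs ++ [[line]]) := by
          simp [pvStepB, hh]
        rw [hA, hB]
        exact ih pre (secs ++ [[line]]) (by intro x hx; rcases List.mem_append.mp hx with hx | hx
                                            · exact hne x hx
                                            · simp at hx; subst hx; simp)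
      · cases hsecs : secs with
        | nil =>
          -- preamble line
          have hA : pvStepA (pvNoDrop [], pvRender (pre ++ (([] : List (List String)).filter pvKeepSec).flatten)) line
              = (pvNoDrop ([] : List (List String)),
                 pvRender ((pre ++ [line]) ++ (([] : List (List String)).filter pvKeepSec).flatten)) := by
            simp [pvStepA, hsC, hh, pvNoDrop, pvRender]
          have hB : pvStepB (pre, ([] : List (List String))) line = (pre ++ [line], []) := by
            simp [pvStepB, hh]
          rw [hA, hB]
          exact ih (pre ++ [line]) [] (by simp)
        | cons s0 rest0 =>
          -- body line appended to the current section
          have hne' : ∀ s ∈ s0 :: rest0, s ≠ [] := by rw [← hsecs]; exact hne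
          have hnn : (s0 :: rest0 : List (List String)) ≠ [] := by simp
          have hA : pvStepA (pvNoDrop (s0 :: rest0), pvRender (pre ++ ((s0 :: rest0).filter pvKeepSec).flatten)) line
              = (pvNoDrop (pvAppendLast (s0 :: rest0) line),
                 pvRender (pre ++ ((pvAppendLast (s0 :: rest0) line).filter pvKeepSec).flatten)) := by
            rw [pvAppendLast_noDrop _ _ hnn hne', pvAppendLast_filter_flatten _ _ hnn hne']
            by_cases hd : pvNoDrop (s0 :: rest0) = true <;>
              simp [pvStepA, hsC, hh, hd, pvRender]
          have hB : pvStepB (pre, s0 :: rest0) line = (pre, pvAppendLast (s0 :: rest0) line) := by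
            simp [pvStepB, hh]
          rw [hA, hB]
          exact ih pre (pvAppendLast (s0 :: rest0) line)
            (pvAppendLast_ne_nil_mem _ _ hne')

-- ===== VERDICT (by name: the statement is the Claim_ definition above) =====
theorem remove_screenshots_spec : Claim_equal_remove_screenshots := by
  intro text _
  unfold Spec_remove_screenshots remove_screenshots remove_screenshots_alt
  have h := pvMain (PySem.Str.splitlines text) [] [] (by simp)
  simp only [pvNoDrop, List.getLast?_nil, List.filter_nil, List.flatten_nil,
    List.append_nil, pvRender, List.flatMap_nil] at h
  rw [h]
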